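-- pv_equiv track=rewrite | github.com/connor-lab/ncov2019-artic-nf | bin/vcf_edit.py | apply_iupac
-- ===== SOURCE A (Python) =====
-- iupac_dict = {('A', 'G'): 'R', ('C', 'T'): 'Y', ('C', 'G'): 'S', ('A', 'T'): 'W', ('G', 'T'): 'K', ('A', 'C'): 'M',
--               ('C', 'G', 'T'): 'B', ('A', 'G', 'T'): 'D', ('A', 'C', 'T'): 'H', ('A', 'C', 'G'): 'V',
--               ('A', 'C', 'G', 'T'): 'N', 'uncertainty': 'N'}
--
-- def apply_iupac(bases_dict):
--     # Order in alphabetical order for lookup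
--     base_list = []
--     [base_list.append(b) for b in bases_dict.keys()]
--     base_list.sort()
--     bases = tuple(base_list)
--     find_iupac = bases
--     called = iupac_dict.get(find_iupac)
--     if not called:
--         # Combination of nucleotides not in dictionary- call uncertain- set to N
--         called = iupac_dict.get('uncertainty')
--     return called
-- ===== SOURCE B (Python) =====
-- # Bitmask re-implementation: each base is a bit (A=1, C=2, G=4, T=8); OR the
-- # bits of the keys and index a 16-entry table instead of sorting + tuple lookup.
-- _IUPAC_TABLE = ['N', 'N', 'N', 'M', 'N', 'R', 'S', 'V',
--                 'N', 'W', 'Y', 'H', 'K', 'D', 'B', 'N']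
-- _BASE_BITS = {'A': 1, 'C': 2, 'G': 4, 'T': 8}
--
-- def apply_iupac(bases_dict):
--     mask = 0
--     for base in bases_dict:
--         bit = _BASE_BITS.get(base)
--         if bit is None:
--             return 'N'
--         mask |= bit
--     return _IUPAC_TABLE[mask]
-- ===== Notes on version B (the rewrite author's own statement) =====
-- stated objective: alternative
-- what changed: Replaces A's build-list + sort + sorted-tuple dictionary lookup by a single pass that ORs one bit per base (A=1,C=2,G=4,T=8) into a mask (returning 'N' early on any non-ACGT key) and indexes a 16-entry table.
import Mathlib
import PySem

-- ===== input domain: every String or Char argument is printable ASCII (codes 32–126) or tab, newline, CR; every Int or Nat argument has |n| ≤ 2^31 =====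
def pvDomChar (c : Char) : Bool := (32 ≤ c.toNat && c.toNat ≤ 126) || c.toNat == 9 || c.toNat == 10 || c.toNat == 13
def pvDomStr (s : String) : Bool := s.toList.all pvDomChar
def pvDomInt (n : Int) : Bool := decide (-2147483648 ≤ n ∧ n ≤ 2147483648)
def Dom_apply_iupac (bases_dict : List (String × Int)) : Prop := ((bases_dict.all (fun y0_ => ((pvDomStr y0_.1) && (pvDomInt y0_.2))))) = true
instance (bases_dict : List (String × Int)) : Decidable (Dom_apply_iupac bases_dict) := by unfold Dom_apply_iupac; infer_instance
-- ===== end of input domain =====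

-- B replaces A's sort + sorted-tuple dictionary lookup by a bitmask (A=1,C=2,G=4,T=8)
-- OR-ed over the keys and a 16-entry table; objective: idiomatic/alternative, same cost.

-- ===== PORT A =====
-- iupac_dict has heterogeneous keys (tuples and the string 'uncertainty'); only the
-- tuple keys are reachable from `get(bases)` where bases is a tuple of the sorted
-- distinct keys, so the dict lookup is ported as this exact first-match function.
def iupacGet? (bases : List String) : Option String :=
  if bases = ["A", "G"] then some "R"
  else if bases = ["C", "T"] then some "Y"
  else if bases = ["C", "G"] then some "S"
  else if bases = ["A", "T"] then some "W"
  else if bases = ["G", "T"] then some "K"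
  else if bases = ["A", "C"] then some "M"
  else if bases = ["C", "G", "T"] then some "B"
  else if bases = ["A", "G", "T"] then some "D"
  else if bases = ["A", "C", "T"] then some "H"
  else if bases = ["A", "C", "G"] then some "V"
  else if bases = ["A", "C", "G", "T"] then some "N"
  else none

def apply_iupac (bases_dict : List (String × Int)) : String :=
  -- bases_dict.keys(): the distinct keys in insertion order
  let base_list := PySem.List.dedup (bases_dict.map Prod.fst)
  -- base_list.sort(); bases = tuple(base_list)
  let bases := PySem.List.sorted base_list (fun b => b) false
  -- called = iupac_dict.get(bases); `if not called` (all stored values are truthy)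
  match iupacGet? bases with
  | some called => called
  | none => "N"  -- iupac_dict.get('uncertainty')

-- ===== PORT B =====
def pvBit? (b : String) : Option Nat :=
  if b = "A" then some 1
  else if b = "C" then some 2
  else if b = "G" then some 4
  else if b = "T" then some 8
  else none

-- the `for base in bases_dict:` loop with its early `return 'N'`
def pvMask? : List String → Option Nat
  | [] => some 0
  | b :: rest =>
    match pvBit? b with
    | none => none
    | some bit =>
      match pvMask? rest with
      | none => none
      | some m => some (m ||| bit)

def pvTable : List String :=
  ["N", "N", "N", "M", "N", "R", "S", "V", "N", "W", "Y", "H", "K", "D", "B", "N"]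

def apply_iupac_alt (bases_dict : List (String × Int)) : String :=
  match pvMask? (PySem.List.dedup (bases_dict.map Prod.fst)) with
  | none => "N"
  | some mask => pvTable.getD mask "N"

-- ===== PRECONDITION & SPEC =====
def Spec_apply_iupac (bases_dict : List (String × Int)) (out : String) : Prop := out = apply_iupac_alt bases_dict
instance (bases_dict : List (String × Int)) (out : String) : Decidable (Spec_apply_iupac bases_dict out) := by unfold Spec_apply_iupac; infer_instance

-- ===== CLAIM (what is proved, stated in full; the proofs are below) =====
def Claim_equal_apply_iupac : Prop := ∀ (bases_dict : List (String × Int)), Dom_apply_iupac bases_dict → Spec_apply_iupac bases_dict (apply_iupac bases_dict)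

-- ===== LEMMAS AND PROOFS =====

lemma pvBit?_eq_none_iff (b : String) :
    pvBit? b = none ↔ b ≠ "A" ∧ b ≠ "C" ∧ b ≠ "G" ∧ b ≠ "T" := by
  unfold pvBit?
  split_ifs <;> simp_all

set_option maxHeartbeats 2000000 in
lemma iupacGet?_eq_none_of_bad {l : List String} {b : String} (hb : b ∈ l)
    (hbad : pvBit? b = none) : iupacGet? l = none := by
  rw [pvBit?_eq_none_iff] at hbad
  by_contra hne
  have hmem : ∀ c ∈ l, c = "A" ∨ c = "C" ∨ c = "G" ∨ c = "T" := by
    unfold iupacGet? at hne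
    split_ifs at hne with h1 h2 h3 h4 h5 h6 h7 h8 h9 h10 h11 <;>
      first
        | exact absurd rfl hne
        | (subst_vars; intro c hc
           simp only [List.mem_cons, List.not_mem_nil, or_false] at hc
           tauto)
  rcases hmem b hb with rfl | rfl | rfl | rfl <;> simp_all

lemma pvMask?_eq_none_iff (l : List String) :
    pvMask? l = none ↔ ∃ b ∈ l, pvBit? b = none := by
  induction l with
  | nil => simp [pvMask?]
  | cons b rest ih =>
    simp only [pvMask?]
    cases hb : pvBit? b with
    | none =>
      simp only [List.mem_cons]
      exact iff_of_true trivial ⟨b, Or.inl rfl, hb⟩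
    | some bit =>
      cases hm : pvMask? rest with
      | none =>
        rw [hm] at ih
        simp only [List.mem_cons]
        refine iff_of_true trivial ?_
        obtain ⟨c, hc, hcn⟩ := ih.mp rfl
        exact ⟨c, Or.inr hc, hcn⟩
      | some m =>
        rw [hm] at ih
        simp only [List.mem_cons]
        refine iff_of_false (by simp) ?_
        rintro ⟨c, hc, hcn⟩
        rcases hc with rfl | hc
        · rw [hcn] at hb; cases hb
        · exact absurd (ih.mpr ⟨c, hc, hcn⟩) (by simp)

lemma pvMask?_perm {l l' : List String} (h : l.Perm l') : pvMask? l = pvMask? l' := by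
  induction h with
  | nil => rfl
  | cons x _ ih => simp only [pvMask?, ih]
  | swap x y l =>
    simp only [pvMask?]
    cases pvBit? x <;> cases pvBit? y <;> cases pvMask? l <;>
      simp [Nat.or_comm, Nat.or_left_comm]
  | trans _ _ ih1 ih2 => rw [ih1, ih2]

lemma apply_iupac_core (ks : List String) (hnd : ks.Nodup) :
    (match iupacGet? (PySem.List.sorted ks (fun b => b) false) with
     | some called => called
     | none => "N")
    = (match pvMask? ks with
       | none => "N"
       | some mask => pvTable.getD mask "N") := by
  by_cases hbad : ∃ b ∈ ks, pvBit? b = none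
  · obtain ⟨b, hb, hbn⟩ := hbad
    rw [(pvMask?_eq_none_iff ks).mpr ⟨b, hb, hbn⟩,
        iupacGet?_eq_none_of_bad ((PySem.List.mem_sorted _ _ _ _).mpr hb) hbn]
  · push Not at hbad
    have hgood : ∀ b ∈ ks, b = "A" ∨ b = "C" ∨ b = "G" ∨ b = "T" := by
      intro b hb
      by_contra hcon
      push Not at hcon
      exact hbad b hb ((pvBit?_eq_none_iff b).mpr
        ⟨hcon.1, hcon.2.1, hcon.2.2.1, hcon.2.2.2⟩)
    set s : List String := List.filter (fun b => decide (b ∈ ks)) ["A", "C", "G", "T"] with hs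
    have hmem : ∀ b, b ∈ s ↔ b ∈ ks := by
      intro b
      simp only [hs, List.mem_filter, decide_eq_true_eq]
      constructor
      · exact fun h => h.2
      · intro h
        refine ⟨?_, h⟩
        rcases hgood b h with rfl | rfl | rfl | rfl <;> simp
    have hsnd : s.Nodup :=
      List.Nodup.filter _ (show (["A", "C", "G", "T"] : List String).Nodup by decide)
    have hperm : s.Perm ks := (List.perm_ext_iff_of_nodup hsnd hnd).mpr hmem
    have hpair : List.Pairwise (fun a b : String => a < b) s :=
      List.Pairwise.filter _
        (show List.Pairwise (fun a b : String => a < b) ["A", "C", "G", "T"] by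
          simp [List.pairwise_cons, String.lt_iff_toList_lt]; decide)
    have hsorted : PySem.List.sorted ks (fun b => b) false = s :=
      PySem.List.sorted_eq_of_perm_of_pairwise_lt ks s (fun b => b) hperm hpair
    have hmask : pvMask? ks = pvMask? s := pvMask?_perm hperm.symm
    rw [hsorted, hmask]
    by_cases hA : "A" ∈ ks <;> by_cases hC : "C" ∈ ks <;>
      by_cases hG : "G" ∈ ks <;> by_cases hT : "T" ∈ ks <;>
        simp only [hs, List.filter, hA, hC, hG, hT, decide_true, decide_false] <;> rfl

-- ===== VERDICT (by name: the statement is the Claim_ definition above) =====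
theorem apply_iupac_spec : Claim_equal_apply_iupac := by
  intro d _
  unfold Spec_apply_iupac apply_iupac apply_iupac_alt
  exact apply_iupac_core _ (PySem.List.nodup_dedup _)
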